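-- pv_equiv track=rewrite | github.com/sdfapproach/leetcode | Maximum Path Score in a Grid.py | maxPathScore
-- ===== SOURCE A (Python) =====
-- from typing import List
--
-- def maxPathScore(grid: List[List[int]], k: int) -> int:
--
--     m, n = len(grid), len(grid[0])
--
--     def score_and_cost(value: int) -> tuple[int, int]:
--         if value == 0:
--             return 0, 0
--         elif value == 1:
--             return 1, 1
--         else:
--             return 2, 1
--
--     NEG = -10**18
--
--     dp = [[[NEG] * (k + 1) for _ in range(n)] for _ in range(m)]
--
--     start_score, start_cost = score_and_cost(grid[0][0])
--
--     if start_cost <= k: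
--         dp[0][0][start_cost] = start_score
--
--     for i in range(m):
--         for j in range(n):
--             cell_score, cell_cost = score_and_cost(grid[i][j])
--
--             for cost in range(k + 1):
--                 if dp[i][j][cost] == NEG:
--                     continue
--
--                 ni, nj = i + 1, j
--                 if ni < m:
--                     next_score, next_cost = score_and_cost(grid[ni][nj])
--                     new_cost = cost + next_cost
--
--                     if new_cost <= k:
--                         dp[ni][nj][new_cost] = max(
--                             dp[ni][nj][new_cost],
--                             dp[i][j][cost] + next_score
--                         )
--
--                 ni, nj = i, j + 1
--                 if nj < n:
--                     next_score, next_cost = score_and_cost(grid[ni][nj])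
--                     new_cost = cost + next_cost
--
--                     if new_cost <= k:
--                         dp[ni][nj][new_cost] = max(
--                             dp[ni][nj][new_cost],
--                             dp[i][j][cost] + next_score
--                         )
--
--     answer = max(dp[m - 1][n - 1])
--
--     return answer if answer != NEG else -1
-- ===== SOURCE B (Python) =====
-- from typing import List
--
-- def maxPathScore(grid: List[List[int]], k: int) -> int:
--     m, n = len(grid), len(grid[0])
--     NEG = -10**18
--
--     def score_and_cost(value: int) -> tuple[int, int]:
--         if value == 0:
--             return 0, 0
--         elif value == 1:
--             return 1, 1
--         else:
--             return 2, 1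
--
--     memo = {}
--
--     def col(i: int, j: int) -> list:
--         # col(i, j)[c] = best score of a path (0,0) -> (i,j) of exact cost c, NEG if none
--         if (i, j) in memo:
--             return memo[(i, j)]
--         s, c = score_and_cost(grid[i][j])
--         if i == 0 and j == 0:
--             res = [s if cost == c else NEG for cost in range(k + 1)]
--         else:
--             def shifted(parent):
--                 return [NEG] * c + [p + s if p != NEG else NEG
--                                     for p in parent[:k + 1 - c]]
--             up = shifted(col(i - 1, j)) if i > 0 else [NEG] * (k + 1)
--             left = shifted(col(i, j - 1)) if j > 0 else [NEG] * (k + 1)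
--             res = [max(a, b) for a, b in zip(up, left)]
--         memo[(i, j)] = res
--         return res
--
--     best = max(col(m - 1, n - 1))
--     return best if best != NEG else -1
-- ===== Notes on version B (the rewrite author's own statement) =====
-- stated objective: alternative
-- what changed: Replaces A's bottom-up row-major push into a 3-dimensional (cell x budget) table by a top-down memoized recursion that computes, per cell, the whole budget-indexed column of best exact-cost scores pulled from its up/left parents.
import Mathlib
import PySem

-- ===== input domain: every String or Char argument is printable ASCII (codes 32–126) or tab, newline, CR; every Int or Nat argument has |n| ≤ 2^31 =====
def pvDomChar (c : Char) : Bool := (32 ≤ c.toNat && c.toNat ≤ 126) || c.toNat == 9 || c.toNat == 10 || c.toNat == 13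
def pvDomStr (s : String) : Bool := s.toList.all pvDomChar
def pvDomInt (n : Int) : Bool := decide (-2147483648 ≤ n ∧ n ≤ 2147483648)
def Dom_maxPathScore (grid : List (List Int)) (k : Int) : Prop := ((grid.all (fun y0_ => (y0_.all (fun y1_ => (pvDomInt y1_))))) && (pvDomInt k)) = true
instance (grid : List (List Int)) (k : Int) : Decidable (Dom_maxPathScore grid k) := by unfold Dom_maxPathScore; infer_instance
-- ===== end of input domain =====

-- B re-implements the same exact-cost DP as a top-down memoized recursion on the cells
-- (one budget-indexed column per cell, pulled from the up/left parents) instead of A's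
-- bottom-up row-major push into a 3-dimensional table; same asymptotic cost (objective: alternative).

-- ===== PORT A =====

def pvNEG : Int := -(10 ^ 18)

def pvSC (v : Int) : Int × Int :=
  if v = 0 then (0, 0) else if v = 1 then (1, 1) else (2, 1)

def pvCell (grid : List (List Int)) (i j : Nat) : Int := (grid.getD i []).getD j 0

-- dp[i][j][c] reads/writes; indices are nonnegative and in range on every access A makes
-- under Pre_maxPathScore, where getD/setIfInBounds are exact for Python list indexing.
-- The budget-indexed columns are Arrays (as Python lists are) so lookups stay O(1).
def pvGet3 (dp : List (List (Array Int))) (i j c : Nat) : Int :=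
  ((dp.getD i []).getD j #[]).getD c pvNEG

def pvSet3 (dp : List (List (Array Int))) (i j c : Nat) (v : Int) : List (List (Array Int)) :=
  dp.modify i (fun row => row.modify j (fun col => col.setIfInBounds c v))

-- body of A's innermost `for cost in range(k+1)` loop
def pvCostStep (grid : List (List Int)) (k : Int) (m n i j : Nat)
    (dp : List (List (Array Int))) (cost : Nat) : List (List (Array Int)) :=
  if pvGet3 dp i j cost = pvNEG then dp
  else
    let dp1 :=
      if i + 1 < m then
        let sc := pvSC (pvCell grid (i + 1) j)
        let newc : Int := (cost : Int) + sc.2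
        if newc ≤ k then
          pvSet3 dp (i + 1) j newc.toNat
            (max (pvGet3 dp (i + 1) j newc.toNat) (pvGet3 dp i j cost + sc.1))
        else dp
      else dp
    if j + 1 < n then
      let sc := pvSC (pvCell grid i (j + 1))
      let newc : Int := (cost : Int) + sc.2
      if newc ≤ k then
        pvSet3 dp1 i (j + 1) newc.toNat
          (max (pvGet3 dp1 i (j + 1) newc.toNat) (pvGet3 dp1 i j cost + sc.1))
      else dp1
    else dp1

-- one grid cell of A's double loop (A computes cell_score/cell_cost and never uses them)
def pvCellStep (grid : List (List Int)) (k : Int) (m n : Nat)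
    (dp : List (List (Array Int))) (i j : Nat) : List (List (Array Int)) :=
  let _cell := pvSC (pvCell grid i j)
  (List.range (k + 1).toNat).foldl (pvCostStep grid k m n i j) dp

def maxPathScore (grid : List (List Int)) (k : Int) : Int :=
  let m := grid.length
  let n := (grid.getD 0 []).length
  let sc0 := pvSC (pvCell grid 0 0)
  let dp0 : List (List (Array Int)) :=
    List.replicate m (List.replicate n (Array.replicate (k + 1).toNat pvNEG))
  let dp1 := if sc0.2 ≤ k then pvSet3 dp0 0 0 sc0.2.toNat sc0.1 else dp0
  let final := (List.range m).foldl
    (fun dp i => (List.range n).foldl (fun dp j => pvCellStep grid k m n dp i j) dp) dp1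
  match PySem.List.max? ((final.getD (m - 1) []).getD (n - 1) #[]).toList (fun x => x) with
  | some a => if a ≠ pvNEG then a else -1
  | none => -1   -- unreachable under Pre_ (Python's max([]) raises there)

-- ===== PORT B =====

-- shifted(parent) of Source B: parent's column moved up by this cell's cost, plus its score
def pvShift (parent : List Int) (s c : Int) (kk : Nat) : List Int :=
  List.replicate c.toNat pvNEG ++
    (parent.take (kk - c.toNat)).map (fun p => if p ≠ pvNEG then p + s else pvNEG)

-- col(i, j) of Source B: memoized top-down recursion, threading the memo dictionary
def pvColB (grid : List (List Int)) (k : Int) (i j : Nat)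
    (memo : PySem.Dict (Nat × Nat) (List Int)) :
    List Int × PySem.Dict (Nat × Nat) (List Int) :=
  match memo.get? (i, j) with
  | some r => (r, memo)
  | none =>
    let kk := (k + 1).toNat
    let sc := pvSC (pvCell grid i j)
    if i = 0 ∧ j = 0 then
      let res := (List.range kk).map (fun (cost : Nat) => if (cost : Int) = sc.2 then sc.1 else pvNEG)
      (res, memo.insert (i, j) res)
    else
      let upm :=
        if _hi : 0 < i then
          let pm := pvColB grid k (i - 1) j memo
          (pvShift pm.1 sc.1 sc.2 kk, pm.2)
        else (List.replicate kk pvNEG, memo)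
      let leftm :=
        if _hj : 0 < j then
          let pm := pvColB grid k i (j - 1) upm.2
          (pvShift pm.1 sc.1 sc.2 kk, pm.2)
        else (List.replicate kk pvNEG, upm.2)
      let res := List.zipWith max upm.1 leftm.1
      (res, leftm.2.insert (i, j) res)
termination_by i + j
decreasing_by all_goals omega

def maxPathScore_alt (grid : List (List Int)) (k : Int) : Int :=
  let m := grid.length
  let n := (grid.getD 0 []).length
  let res := (pvColB grid k (m - 1) (n - 1) PySem.Dict.empty).1
  match PySem.List.max? res (fun x => x) with
  | some b => if b ≠ pvNEG then b else -1
  | none => -1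

-- ===== PRECONDITION & SPEC =====

-- Pre_ excludes exactly the inputs where Python A raises: an empty grid / empty first row
-- (IndexError), a row shorter than the first (IndexError), and k < 0 (max of an empty list).
def Pre_maxPathScore (grid : List (List Int)) (k : Int) : Prop :=
  grid ≠ [] ∧ grid.getD 0 [] ≠ [] ∧ 0 ≤ k ∧
    ∀ row ∈ grid, (grid.getD 0 []).length ≤ row.length

instance (grid : List (List Int)) (k : Int) : Decidable (Pre_maxPathScore grid k) := by
  unfold Pre_maxPathScore; infer_instance

def pvWitness_maxPathScore : List (List Int) × Int := ([[1, 0], [2, 5]], 2)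

def Spec_maxPathScore (grid : List (List Int)) (k : Int) (out : Int) : Prop := out = maxPathScore_alt grid k
instance (grid : List (List Int)) (k : Int) (out : Int) : Decidable (Spec_maxPathScore grid k out) := by unfold Spec_maxPathScore; infer_instance

-- ===== CLAIM (what is proved, stated in full; the proofs are below) =====
def Claim_equal_maxPathScore : Prop := ∀ (grid : List (List Int)) (k : Int), Dom_maxPathScore grid k → Pre_maxPathScore grid k → Spec_maxPathScore grid k (maxPathScore grid k)

-- ===== LEMMAS AND PROOFS =====

def pvKK (k : Int) : Nat := (k + 1).toNat
def pvS (grid : List (List Int)) (i j : Nat) : Int := (pvSC (pvCell grid i j)).1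
def pvC (grid : List (List Int)) (i j : Nat) : Int := (pvSC (pvCell grid i j)).2
def pvNegCol (k : Int) : List Int := List.replicate (pvKK k) pvNEG

-- index-wise description of pvShift (what Source B's comprehension computes entrywise)
def pvShiftIdx (parent : List Int) (s c : Int) (kk : Nat) : List Int :=
  (List.range kk).map (fun (cost : Nat) =>
    if c ≤ (cost : Int) ∧ parent.getD (cost - c.toNat) pvNEG ≠ pvNEG then
      parent.getD (cost - c.toNat) pvNEG + s
    else pvNEG)

def pvColAt (dp : List (List (Array Int))) (u v : Nat) : Array Int := (dp.getD u []).getD v #[]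

def pvColAtL (dp : List (List (Array Int))) (u v : Nat) : List Int := (pvColAt dp u v).toList

def pvBase (grid : List (List Int)) (k : Int) (i j : Nat) : List Int :=
  if i = 0 ∧ j = 0 then
    (List.range (pvKK k)).map (fun (cost : Nat) => if (cost : Int) = pvC grid 0 0 then pvS grid 0 0 else pvNEG)
  else pvNegCol k

-- the pure (memo-free) column recursion that both programs compute
def pvF (grid : List (List Int)) (k : Int) (i j : Nat) : List Int :=
  if i = 0 ∧ j = 0 then pvBase grid k 0 0
  else
    let up := if _hi : 0 < i then pvShiftIdx (pvF grid k (i - 1) j) (pvS grid i j) (pvC grid i j) (pvKK k)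
              else pvNegCol k
    let left := if _hj : 0 < j then pvShiftIdx (pvF grid k i (j - 1)) (pvS grid i j) (pvC grid i j) (pvKK k)
                else pvNegCol k
    List.zipWith max up left
termination_by i + j
decreasing_by all_goals omega

-- "cell (u,v) is already processed when the row-major loop is about to do (i,j)"
abbrev pvProc (i j u v : Nat) : Prop := u < i ∨ (u = i ∧ v < j)

-- contents of dp[u][v] when the loop is about to process (i,j)
def pvColSt (grid : List (List Int)) (k : Int) (i j u v : Nat) : List Int :=
  List.zipWith max
    (List.zipWith max (pvBase grid k u v)
      (if 0 < u ∧ pvProc i j (u - 1) v then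
        pvShiftIdx (pvF grid k (u - 1) v) (pvS grid u v) (pvC grid u v) (pvKK k)
       else pvNegCol k))
    (if 0 < v ∧ pvProc i j u (v - 1) then
      pvShiftIdx (pvF grid k u (v - 1)) (pvS grid u v) (pvC grid u v) (pvKK k)
     else pvNegCol k)


def pvInv (grid : List (List Int)) (k : Int) (dp : List (List (Array Int))) (i j : Nat) : Prop :=
  dp.length = grid.length ∧
  ∀ u, u < grid.length →
    (dp.getD u []).length = (grid.getD 0 []).length ∧
    ∀ v, v < (grid.getD 0 []).length → pvColAtL dp u v = pvColSt grid k i j u v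

-- ---- basic facts ----

theorem pvNEG_lt : pvNEG < 0 := by norm_num [pvNEG]

theorem pvSC_fst_nonneg (v : Int) : 0 ≤ (pvSC v).1 := by
  unfold pvSC; split_ifs <;> norm_num

theorem pvSC_snd_nonneg (v : Int) : 0 ≤ (pvSC v).2 := by
  unfold pvSC; split_ifs <;> norm_num

theorem length_pvShiftIdx (parent : List Int) (s c : Int) (kk : Nat) :
    (pvShiftIdx parent s c kk).length = kk := by
  simp [pvShiftIdx]

theorem length_pvBase (grid : List (List Int)) (k : Int) (i j : Nat) :
    (pvBase grid k i j).length = pvKK k := by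
  unfold pvBase; split_ifs <;> simp [pvNegCol]

theorem length_pvColSt (grid : List (List Int)) (k : Int) (i j u v : Nat) :
    (pvColSt grid k i j u v).length = pvKK k := by
  unfold pvColSt
  simp only [List.length_zipWith, length_pvBase]
  split_ifs <;> simp [length_pvShiftIdx, pvNegCol]

theorem pvBase_mem (grid : List (List Int)) (k : Int) (i j : Nat) :
    ∀ x ∈ pvBase grid k i j, x = pvNEG ∨ 0 ≤ x := by
  intro x hx
  unfold pvBase at hx
  split_ifs at hx with h
  · simp only [List.mem_map, List.mem_range] at hx
    obtain ⟨cost, -, rfl⟩ := hx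
    split_ifs
    · right; exact pvSC_fst_nonneg _
    · left; rfl
  · left; exact List.eq_of_mem_replicate hx

theorem pvShiftIdx_mem (parent : List Int) (s c : Int) (kk : Nat)
    (hp : ∀ x ∈ parent, x = pvNEG ∨ 0 ≤ x) (hs : 0 ≤ s) :
    ∀ x ∈ pvShiftIdx parent s c kk, x = pvNEG ∨ 0 ≤ x := by
  intro x hx
  simp only [pvShiftIdx, List.mem_map, List.mem_range] at hx
  obtain ⟨cost, -, rfl⟩ := hx
  split_ifs with h
  · right
    by_cases hlt : cost - c.toNat < parent.length
    · rw [List.getD_eq_getElem parent pvNEG hlt] at h ⊢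
      rcases hp _ (List.getElem_mem hlt) with h0 | h0
      · exact absurd h0 h.2
      · omega
    · rw [List.getD_eq_getElem?_getD, List.getElem?_eq_none (by omega)] at h
      exact absurd rfl h.2
  · left; rfl

-- entries of pvF are pvNEG or nonnegative
theorem pvMaxGood {a b : Int} (ha : a = pvNEG ∨ 0 ≤ a) (hb : b = pvNEG ∨ 0 ≤ b) :
    max a b = pvNEG ∨ 0 ≤ max a b := by
  rcases ha with rfl | ha
  · rcases hb with rfl | hb
    · left; simp
    · right; exact le_trans hb (le_max_right _ _)
  · right; exact le_trans ha (le_max_left _ _)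

theorem pvF_mem_aux (grid : List (List Int)) (k : Int) :
    ∀ (N i j : Nat), i + j ≤ N → ∀ x ∈ pvF grid k i j, x = pvNEG ∨ 0 ≤ x := by
  intro N
  induction N with
  | zero =>
    intro i j hij x hx
    have hi0 : i = 0 := by omega
    have hj0 : j = 0 := by omega
    subst hi0; subst hj0
    rw [pvF, if_pos ⟨rfl, rfl⟩] at hx
    exact pvBase_mem grid k 0 0 x hx
  | succ N ih =>
    intro i j hij x hx
    rw [pvF] at hx
    by_cases h0 : i = 0 ∧ j = 0
    · rw [if_pos h0] at hx; exact pvBase_mem grid k 0 0 x hx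
    · rw [if_neg h0] at hx
      simp only [] at hx
      rcases List.mem_iff_getElem.mp hx with ⟨c, hc, rfl⟩
      rw [List.getElem_zipWith]
      have hup : ∀ y ∈ (if _hi : 0 < i then pvShiftIdx (pvF grid k (i - 1) j) (pvS grid i j) (pvC grid i j) (pvKK k) else pvNegCol k), y = pvNEG ∨ 0 ≤ y := by
        split_ifs with hi
        · exact pvShiftIdx_mem _ _ _ _ (ih (i - 1) j (by omega)) (pvSC_fst_nonneg _)
        · intro y hy; left; exact List.eq_of_mem_replicate hy
      have hleft : ∀ y ∈ (if _hj : 0 < j then pvShiftIdx (pvF grid k i (j - 1)) (pvS grid i j) (pvC grid i j) (pvKK k) else pvNegCol k), y = pvNEG ∨ 0 ≤ y := by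
        split_ifs with hj
        · exact pvShiftIdx_mem _ _ _ _ (ih i (j - 1) (by omega)) (pvSC_fst_nonneg _)
        · intro y hy; left; exact List.eq_of_mem_replicate hy
      exact pvMaxGood (hup _ (List.getElem_mem _)) (hleft _ (List.getElem_mem _))

theorem pvF_mem (grid : List (List Int)) (k : Int) (i j : Nat) :
    ∀ x ∈ pvF grid k i j, x = pvNEG ∨ 0 ≤ x :=
  pvF_mem_aux grid k (i + j) i j le_rfl

theorem pvGoodGe {x : Int} (h : x = pvNEG ∨ 0 ≤ x) : pvNEG ≤ x := by
  rcases h with rfl | h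
  · exact le_rfl
  · exact le_trans (le_of_lt pvNEG_lt) h

theorem pvNegCol_ge (k : Int) : ∀ x ∈ pvNegCol k, pvNEG ≤ x := by
  intro x hx; rw [List.eq_of_mem_replicate hx]

-- the up/left summand of pvColSt is pointwise ≥ pvNEG
theorem pvArmGood (grid : List (List Int)) (k : Int) (c : Prop) [Decidable c] (p q u v : Nat) :
    ∀ x ∈ (if c then pvShiftIdx (pvF grid k p q) (pvS grid u v) (pvC grid u v) (pvKK k)
           else pvNegCol k), pvNEG ≤ x := by
  split_ifs
  · intro x hx
    exact pvGoodGe (pvShiftIdx_mem _ _ _ _ (pvF_mem grid k p q) (pvSC_fst_nonneg _) x hx)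
  · exact pvNegCol_ge k

theorem length_pvArm (grid : List (List Int)) (k : Int) (c : Prop) [Decidable c] (p q u v : Nat) :
    (if c then pvShiftIdx (pvF grid k p q) (pvS grid u v) (pvC grid u v) (pvKK k)
     else pvNegCol k).length = pvKK k := by
  split_ifs <;> simp [length_pvShiftIdx, pvNegCol]

theorem pvColSt_mem (grid : List (List Int)) (k : Int) (i j u v : Nat) :
    ∀ x ∈ pvColSt grid k i j u v, pvNEG ≤ x := by
  intro x hx
  unfold pvColSt at hx
  rcases List.mem_iff_getElem.mp hx with ⟨c, hc, rfl⟩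
  rw [List.getElem_zipWith, List.getElem_zipWith]
  exact le_trans (le_trans (pvGoodGe (pvBase_mem grid k u v _ (List.getElem_mem _)))
    (le_max_left _ _)) (le_max_left _ _)

-- absorption: a column pointwise ≥ pvNEG swallows the all-pvNEG column
theorem pvAbsorbR (k : Int) (col : List Int) (hlen : col.length = pvKK k)
    (h : ∀ x ∈ col, pvNEG ≤ x) : List.zipWith max col (pvNegCol k) = col := by
  apply List.ext_getElem
  · simp [List.length_zipWith, hlen, pvNegCol]
  · intro c h1 h2
    rw [List.getElem_zipWith]
    have : (pvNegCol k)[c]'(by simpa [pvNegCol, hlen] using h2) = pvNEG := by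
      simp [pvNegCol]
    rw [this]
    exact max_eq_left (h _ (List.getElem_mem _))

theorem pvAbsorbL (k : Int) (col : List Int) (hlen : col.length = pvKK k)
    (h : ∀ x ∈ col, pvNEG ≤ x) : List.zipWith max (pvNegCol k) col = col := by
  apply List.ext_getElem
  · simp [List.length_zipWith, hlen, pvNegCol]
  · intro c h1 h2
    rw [List.getElem_zipWith]
    have : (pvNegCol k)[c]'(by simpa [pvNegCol, hlen] using h2) = pvNEG := by
      simp [pvNegCol]
    rw [this]
    exact max_eq_right (h _ (List.getElem_mem _))

theorem pvBase_neg (grid : List (List Int)) (k : Int) (u v : Nat) (h : ¬(u = 0 ∧ v = 0)) :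
    pvBase grid k u v = pvNegCol k := by
  unfold pvBase; rw [if_neg h]

theorem pvColSt_full (grid : List (List Int)) (k : Int) (i j u v : Nat)
    (hu : 0 < u → pvProc i j (u - 1) v) (hv : 0 < v → pvProc i j u (v - 1)) :
    pvColSt grid k i j u v = pvF grid k u v := by
  unfold pvColSt
  by_cases huv : u = 0 ∧ v = 0
  · obtain ⟨rfl, rfl⟩ := huv
    rw [if_neg (by simp : ¬(0 < 0 ∧ pvProc i j (0 - 1) 0))]
    rw [pvAbsorbR k _ (length_pvBase grid k 0 0) (fun x hx => pvGoodGe (pvBase_mem grid k 0 0 x hx))]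
    rw [pvAbsorbR k _ (length_pvBase grid k 0 0) (fun x hx => pvGoodGe (pvBase_mem grid k 0 0 x hx))]
    rw [pvF, if_pos ⟨rfl, rfl⟩]
  · rw [pvBase_neg grid k u v huv]
    conv_rhs => rw [pvF]
    rw [if_neg huv]
    simp only []
    have hUc : (0 < u ∧ pvProc i j (u - 1) v) ↔ 0 < u := ⟨fun h => h.1, fun h => ⟨h, hu h⟩⟩
    have hLc : (0 < v ∧ pvProc i j u (v - 1)) ↔ 0 < v := ⟨fun h => h.1, fun h => ⟨h, hv h⟩⟩
    rw [if_congr hUc rfl rfl, if_congr hLc rfl rfl]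
    rw [dite_eq_ite, dite_eq_ite]
    congr 1
    exact pvAbsorbL k _ (length_pvArm grid k (0 < u) (u - 1) v u v)
      (pvArmGood grid k (0 < u) (u - 1) v u v)

-- ---- B-side: the memoized recursion computes pvF ----

def pvMemoGood (grid : List (List Int)) (k : Int) (memo : PySem.Dict (Nat × Nat) (List Int)) : Prop :=
  ∀ i j r, memo.get? (i, j) = some r → r = pvF grid k i j

theorem pvSC_snd_le_one (v : Int) : (pvSC v).2 ≤ 1 := by
  unfold pvSC; split_ifs <;> norm_num

theorem length_pvShiftIdx2 (parent : List Int) (s c : Int) (kk : Nat) :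
    (pvShiftIdx parent s c kk).length = kk := by simp [pvShiftIdx]

theorem length_pvF (grid : List (List Int)) (k : Int) (i j : Nat) :
    (pvF grid k i j).length = pvKK k := by
  rw [pvF]
  split_ifs with h
  · exact length_pvBase grid k 0 0
  all_goals simp [List.length_zipWith, length_pvShiftIdx2, pvNegCol]

theorem pvShift_eq_idx (parent : List Int) (s c : Int) (kk : Nat) (hc : 0 ≤ c)
    (hck : c.toNat ≤ kk) (hp : parent.length = kk) :
    pvShift parent s c kk = pvShiftIdx parent s c kk := by
  apply List.ext_getElem
  · simp [pvShift, pvShiftIdx, hp]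
    omega
  · intro a h1 h2
    have ha : a < kk := by simpa [pvShiftIdx] using h2
    simp only [pvShiftIdx, List.getElem_map, List.getElem_range, pvShift]
    by_cases hlt : a < c.toNat
    · rw [List.getElem_append_left (by simpa using hlt)]
      rw [List.getElem_replicate, if_neg (by omega)]
    · rw [List.getElem_append_right (by simpa using hlt)]
      simp only [List.getElem_map, List.getElem_take, List.length_replicate]
      have hidx : a - c.toNat < parent.length := by omega
      rw [List.getD_eq_getElem parent pvNEG hidx]
      rw [if_congr (show (parent[a - c.toNat]'hidx ≠ pvNEG) ↔
          (c ≤ (a : Int) ∧ parent[a - c.toNat]'hidx ≠ pvNEG) from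
          ⟨fun hh => ⟨by omega, hh⟩, fun hh => hh.2⟩) rfl rfl]

theorem pvColB_eq (grid : List (List Int)) (k : Int) (hk : 0 ≤ k) :
    ∀ (N i j : Nat), i + j ≤ N → ∀ memo, pvMemoGood grid k memo →
      (pvColB grid k i j memo).1 = pvF grid k i j ∧
      pvMemoGood grid k (pvColB grid k i j memo).2 := by
  have base : ∀ (i j : Nat) (memo : PySem.Dict (Nat × Nat) (List Int)), pvMemoGood grid k memo →
      memo.get? (0, 0) = none → i = 0 → j = 0 →
      (pvColB grid k i j memo).1 = pvF grid k i j ∧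
      pvMemoGood grid k (pvColB grid k i j memo).2 := by
    intro i j memo hg hm hi hj
    subst hi; subst hj
    rw [pvColB]
    simp only [hm]
    simp only [and_self, if_true]
    constructor
    · rw [pvF, if_pos ⟨rfl, rfl⟩]; rfl
    · intro a b r' h
      rw [PySem.Dict.get?_insert] at h
      split_ifs at h with hab
      · obtain ⟨rfl, rfl⟩ : a = 0 ∧ b = 0 := by
          constructor <;> [exact congrArg Prod.fst hab; exact congrArg Prod.snd hab]
        rw [← Option.some_inj.mp h, pvF, if_pos ⟨rfl, rfl⟩]; rfl
      · exact hg a b r' h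
  intro N
  induction N with
  | zero =>
    intro i j hij memo hg
    have hi : i = 0 := by omega
    have hj : j = 0 := by omega
    subst hi; subst hj
    cases hm : memo.get? (0, 0) with
    | some r =>
      rw [pvColB]; simp only [hm]
      exact ⟨hg 0 0 r hm, hg⟩
    | none => exact base 0 0 memo hg hm rfl rfl
  | succ N ih =>
    intro i j hij memo hg
    cases hm : memo.get? (i, j) with
    | some r =>
      rw [pvColB]; simp only [hm]
      exact ⟨hg i j r hm, hg⟩
    | none =>
      by_cases h0 : i = 0 ∧ j = 0
      · obtain ⟨rfl, rfl⟩ := h0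
        exact base 0 0 memo hg hm rfl rfl
      · rw [pvColB]
        simp only [hm, if_neg h0]
        have goodIns : ∀ (memo' : PySem.Dict (Nat × Nat) (List Int)), pvMemoGood grid k memo' →
            ∀ res, res = pvF grid k i j → pvMemoGood grid k (memo'.insert (i, j) res) := by
          intro memo' hg' res hres a b r' h
          rw [PySem.Dict.get?_insert] at h
          split_ifs at h with hab
          · obtain ⟨rfl, rfl⟩ : a = i ∧ b = j := by
              constructor <;> [exact congrArg Prod.fst hab; exact congrArg Prod.snd hab]
            rw [← Option.some_inj.mp h, hres]
          · exact hg' a b r' h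
        have hsh : ∀ (p q : Nat), pvShift (pvF grid k p q) (pvSC (pvCell grid i j)).1
            (pvSC (pvCell grid i j)).2 (k + 1).toNat =
            pvShiftIdx (pvF grid k p q) (pvSC (pvCell grid i j)).1
            (pvSC (pvCell grid i j)).2 (k + 1).toNat := by
          intro p q
          refine pvShift_eq_idx _ _ _ _ (pvSC_snd_nonneg _) ?_ (length_pvF grid k p q)
          have h1 := pvSC_snd_nonneg (pvCell grid i j)
          have h2 := pvSC_snd_le_one (pvCell grid i j)
          omega
        by_cases hi : 0 < i <;> by_cases hj : 0 < j
        · obtain ⟨h1, h2⟩ := ih (i - 1) j (by omega) memo hg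
          obtain ⟨h3, h4⟩ := ih i (j - 1) (by omega) (pvColB grid k (i - 1) j memo).2 h2
          simp only [dif_pos hi, dif_pos hj, h1, h3, hsh]
          refine ⟨?_, goodIns _ h4 _ ?_⟩ <;>
            (conv_rhs => rw [pvF]) <;> rw [if_neg h0] <;> simp only [dif_pos hi, dif_pos hj] <;> rfl
        · obtain ⟨h1, h2⟩ := ih (i - 1) j (by omega) memo hg
          simp only [dif_pos hi, dif_neg hj, h1, hsh]
          refine ⟨?_, goodIns _ h2 _ ?_⟩ <;>
            (conv_rhs => rw [pvF]) <;> rw [if_neg h0] <;> simp only [dif_pos hi, dif_neg hj] <;> rfl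
        · obtain ⟨h3, h4⟩ := ih i (j - 1) (by omega) memo hg
          simp only [dif_neg hi, dif_pos hj, h3, hsh]
          refine ⟨?_, goodIns _ h4 _ ?_⟩ <;>
            (conv_rhs => rw [pvF]) <;> rw [if_neg h0] <;> simp only [dif_neg hi, dif_pos hj] <;> rfl
        · exact absurd ⟨by omega, by omega⟩ h0

-- ---- dp-array access lemmas ----

theorem pvGetD_modify {α : Type} (l : List α) (i u : Nat) (f : α → α) (d : α) :
    (l.modify i f).getD u d =
      if i = u then (if h : u < l.length then f (l[u]'h) else d) else l.getD u d := by
  rw [List.getD_eq_getElem?_getD, List.getElem?_modify]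
  by_cases hiu : i = u
  · subst hiu
    by_cases hl : i < l.length
    · rw [List.getElem?_eq_getElem hl]; simp [hl]
    · rw [List.getElem?_eq_none (by omega)]; simp [hl]
  · rw [List.getD_eq_getElem?_getD]
    cases h : l[u]? <;> simp [hiu]

theorem pvRow_set3 (dp : List (List (Array Int))) (i j c : Nat) (x : Int) (u : Nat) :
    (pvSet3 dp i j c x).getD u [] =
      if i = u then (dp.getD u []).modify j (fun col => col.setIfInBounds c x)
      else dp.getD u [] := by
  unfold pvSet3
  rw [pvGetD_modify]
  by_cases hu : i = u
  · subst hu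
    rw [if_pos rfl, if_pos rfl]
    by_cases hl : i < dp.length
    · rw [dif_pos hl]
      congr 1
      exact (List.getD_eq_getElem dp [] hl).symm
    · rw [dif_neg hl, List.getD_eq_getElem?_getD, List.getElem?_eq_none (by omega)]
      simp
  · rw [if_neg hu, if_neg hu]

theorem pvColAtA_set3 (dp : List (List (Array Int))) (i j c : Nat) (x : Int) (u v : Nat) :
    pvColAt (pvSet3 dp i j c x) u v =
      if i = u ∧ j = v then (pvColAt dp u v).setIfInBounds c x else pvColAt dp u v := by
  unfold pvColAt
  rw [pvRow_set3]
  by_cases hu : i = u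
  · subst hu
    rw [if_pos rfl, pvGetD_modify]
    by_cases hv : j = v
    · subst hv
      rw [if_pos rfl, if_pos ⟨rfl, rfl⟩]
      by_cases h2 : j < (dp.getD i []).length
      · rw [dif_pos h2]
        congr 1
        exact (List.getD_eq_getElem _ #[] h2).symm
      · rw [dif_neg h2, List.getD_eq_getElem?_getD, List.getElem?_eq_none (by omega)]
        apply Array.ext'
        simp
    · rw [if_neg hv, if_neg (fun hh => hv hh.2)]
  · rw [if_neg hu, if_neg (fun hh => hu hh.1)]

theorem pvColAtL_set3 (dp : List (List (Array Int))) (i j c : Nat) (x : Int) (u v : Nat) :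
    pvColAtL (pvSet3 dp i j c x) u v =
      if i = u ∧ j = v then (pvColAtL dp u v).set c x else pvColAtL dp u v := by
  unfold pvColAtL
  rw [pvColAtA_set3]
  split_ifs
  · rw [Array.toList_setIfInBounds]
  · rfl

theorem pvLen_set3 (dp : List (List (Array Int))) (i j c : Nat) (x : Int) :
    (pvSet3 dp i j c x).length = dp.length := by
  simp [pvSet3]

theorem pvRowLen_set3 (dp : List (List (Array Int))) (i j c : Nat) (x : Int) (u : Nat) :
    ((pvSet3 dp i j c x).getD u []).length = (dp.getD u []).length := by
  rw [pvRow_set3]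
  split_ifs <;> simp

theorem pvArrGetD (a : Array Int) (c : Nat) : a.getD c pvNEG = a.toList.getD c pvNEG := by
  rw [List.getD_eq_getElem?_getD, Array.getElem?_toList]
  by_cases h : c < a.size
  · rw [Array.getElem?_eq_getElem h]
    simp [Array.getD, h]
  · rw [Array.getElem?_eq_none (by omega)]
    simp [Array.getD, h]

theorem pvGet3_eq_colAt (dp : List (List (Array Int))) (u v c : Nat) :
    pvGet3 dp u v c = (pvColAtL dp u v).getD c pvNEG := by
  unfold pvGet3 pvColAtL pvColAt
  exact pvArrGetD _ _

-- ---- the partially-pushed shifted column ----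

def pvShiftP (parent : List Int) (s c : Int) (kk c0 : Nat) : List Int :=
  (List.range kk).map (fun (cost : Nat) =>
    if c ≤ (cost : Int) ∧ cost - c.toNat < c0 ∧ parent.getD (cost - c.toNat) pvNEG ≠ pvNEG then
      parent.getD (cost - c.toNat) pvNEG + s
    else pvNEG)

theorem length_pvShiftIdxP (parent : List Int) (s c : Int) (kk c0 : Nat) :
    (pvShiftP parent s c kk c0).length = kk := by simp [pvShiftP]

theorem pvShiftP_zero (parent : List Int) (s c : Int) (kk : Nat) :
    pvShiftP parent s c kk 0 = List.replicate kk pvNEG := by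
  apply List.ext_getElem
  · simp [pvShiftP]
  · intro a h1 h2
    simp only [pvShiftP, List.getElem_map, List.getElem_range, List.getElem_replicate]
    rw [if_neg (by omega)]

theorem pvShiftP_top (parent : List Int) (s c : Int) (kk c0 : Nat) (h : kk ≤ c0) :
    pvShiftP parent s c kk c0 = pvShiftIdx parent s c kk := by
  apply List.ext_getElem
  · simp [pvShiftP, pvShiftIdx]
  · intro a h1 h2
    simp only [pvShiftP, pvShiftIdx, List.getElem_map, List.getElem_range]
    have ha : a < kk := by simpa [pvShiftP] using h1
    have : (c ≤ (a : Int) ∧ a - c.toNat < c0 ∧ parent.getD (a - c.toNat) pvNEG ≠ pvNEG) ↔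
        (c ≤ (a : Int) ∧ parent.getD (a - c.toNat) pvNEG ≠ pvNEG) := by
      constructor
      · rintro ⟨x, -, y⟩; exact ⟨x, y⟩
      · rintro ⟨x, y⟩; exact ⟨x, by omega, y⟩
    rw [if_congr this rfl rfl]

theorem pvShiftP_succ_of_neg (parent : List Int) (s c : Int) (kk c0 : Nat)
    (h : parent.getD c0 pvNEG = pvNEG) :
    pvShiftP parent s c kk (c0 + 1) = pvShiftP parent s c kk c0 := by
  apply List.ext_getElem
  · simp [pvShiftP]
  · intro a h1 h2
    simp only [pvShiftP, List.getElem_map, List.getElem_range]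
    by_cases he : a - c.toNat = c0
    · rw [if_neg (by rw [he]; tauto), if_neg (by rw [he]; omega)]
    · have : a - c.toNat < c0 + 1 ↔ a - c.toNat < c0 := by omega
      rw [if_congr (and_congr_right fun _ => and_congr_left fun _ => this) rfl rfl]

theorem pvShiftP_succ_of_over (k : Int) (hk : 0 ≤ k) (parent : List Int) (s c : Int)
    (hc : 0 ≤ c) (c0 : Nat) (hover : k < (c0 : Int) + c) :
    pvShiftP parent s c (pvKK k) (c0 + 1) = pvShiftP parent s c (pvKK k) c0 := by
  apply List.ext_getElem
  · simp [pvShiftP]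
  · intro a h1 h2
    have ha : a < pvKK k := by simpa [pvShiftP] using h1
    simp only [pvShiftP, List.getElem_map, List.getElem_range]
    by_cases he : (c ≤ (a : Int) ∧ a - c.toNat = c0)
    · exfalso
      have : (a : Int) = (c0 : Int) + c := by omega
      have : ((pvKK k : Nat) : Int) ≤ (a : Int) := by
        unfold pvKK; omega
      omega
    · have : (c ≤ (a : Int) ∧ a - c.toNat < c0 + 1 ∧ parent.getD (a - c.toNat) pvNEG ≠ pvNEG) ↔
          (c ≤ (a : Int) ∧ a - c.toNat < c0 ∧ parent.getD (a - c.toNat) pvNEG ≠ pvNEG) := by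
        constructor
        · rintro ⟨x, y, z⟩
          refine ⟨x, ?_, z⟩
          rcases Nat.lt_succ_iff_lt_or_eq.mp y with h' | h'
          · exact h'
          · exact absurd ⟨x, h'⟩ he
        · rintro ⟨x, y, z⟩; exact ⟨x, by omega, z⟩
      rw [if_congr this rfl rfl]

-- one successful push into a target column
theorem pvPush (k : Int) (hk : 0 ≤ k) (old src : List Int) (s c : Int) (hc : 0 ≤ c)
    (hold : old.length = pvKK k) (hge : ∀ x ∈ old, pvNEG ≤ x) (c0 : Nat)
    (hcur : src.getD c0 pvNEG ≠ pvNEG) (hbud : (c0 : Int) + c ≤ k) :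
    (List.zipWith max old (pvShiftP src s c (pvKK k) c0)).set ((c0 : Int) + c).toNat
      (max ((List.zipWith max old (pvShiftP src s c (pvKK k) c0)).getD ((c0 : Int) + c).toNat pvNEG)
        (src.getD c0 pvNEG + s)) =
    List.zipWith max old (pvShiftP src s c (pvKK k) (c0 + 1)) := by
  have hidx : ((c0 : Int) + c).toNat = c0 + c.toNat := by omega
  have hidxk : c0 + c.toNat < pvKK k := by unfold pvKK; omega
  apply List.ext_getElem
  · simp [List.length_zipWith, length_pvShiftIdxP, hold]
  · intro a h1 h2
    have ha : a < pvKK k := by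
      simp only [List.length_set, List.length_zipWith, length_pvShiftIdxP, hold] at h1
      omega
    have hlz : a < (List.zipWith max old (pvShiftP src s c (pvKK k) c0)).length := by
      simp [List.length_zipWith, length_pvShiftIdxP, hold, ha]
    rw [List.getElem_set, List.getElem_zipWith]
    by_cases he : a = c0 + c.toNat
    · subst he
      rw [if_pos (by omega)]
      have hT : (List.zipWith max old (pvShiftP src s c (pvKK k) c0)).getD
          ((c0 : Int) + c).toNat pvNEG =
          (List.zipWith max old (pvShiftP src s c (pvKK k) c0))[c0 + c.toNat]'hlz := by
        rw [hidx]
        exact List.getD_eq_getElem _ _ hlz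
      rw [hT, List.getElem_zipWith]
      have hsp0 : (pvShiftP src s c (pvKK k) c0)[c0 + c.toNat]'(by
          rw [length_pvShiftIdxP]; exact hidxk) = pvNEG := by
        simp only [pvShiftP, List.getElem_map, List.getElem_range]
        rw [if_neg (by omega)]
      have hsp1 : (pvShiftP src s c (pvKK k) (c0 + 1))[c0 + c.toNat]'(by
          rw [length_pvShiftIdxP]; exact hidxk) = src.getD c0 pvNEG + s := by
        simp only [pvShiftP, List.getElem_map, List.getElem_range]
        rw [if_pos ⟨by omega, by rw [show c0 + c.toNat - c.toNat = c0 by omega]; exact ⟨by omega, hcur⟩⟩]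
        rw [show c0 + c.toNat - c.toNat = c0 by omega]
      rw [hsp0]
      conv_rhs => rw [List.getElem_zipWith]
      rw [hsp1, max_eq_left (hge _ (List.getElem_mem _))]
    · rw [if_neg (by omega), List.getElem_zipWith]
      congr 1
      simp only [pvShiftP, List.getElem_map, List.getElem_range]
      have : (c ≤ (a : Int) ∧ a - c.toNat < c0 + 1 ∧ src.getD (a - c.toNat) pvNEG ≠ pvNEG) ↔
          (c ≤ (a : Int) ∧ a - c.toNat < c0 ∧ src.getD (a - c.toNat) pvNEG ≠ pvNEG) := by
        constructor
        · rintro ⟨hx, hy, hz⟩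
          refine ⟨hx, ?_, hz⟩
          have : a - c.toNat ≠ c0 := by omega
          omega
        · rintro ⟨hx, hy, hz⟩; exact ⟨hx, by omega, hz⟩
      rw [if_congr this rfl rfl]

-- ---- state of dp in the middle of processing cell (i,j): the downward push has seen
-- source costs < c1, the rightward push costs < c2 ----

def pvMidSt (grid : List (List Int)) (k : Int) (i j : Nat) (dp : List (List (Array Int)))
    (c1 c2 u v : Nat) : List Int :=
  if u = i + 1 ∧ v = j then
    List.zipWith max (pvColAtL dp u v)
      (pvShiftP (pvColAtL dp i j) (pvS grid u v) (pvC grid u v) (pvKK k) c1)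
  else if u = i ∧ v = j + 1 then
    List.zipWith max (pvColAtL dp u v)
      (pvShiftP (pvColAtL dp i j) (pvS grid u v) (pvC grid u v) (pvKK k) c2)
  else pvColAtL dp u v

theorem pvMidSt_src (grid : List (List Int)) (k : Int) (i j : Nat) (dp : List (List (Array Int)))
    (c1 c2 : Nat) : pvMidSt grid k i j dp c1 c2 i j = pvColAtL dp i j := by
  unfold pvMidSt
  rw [if_neg (by omega), if_neg (by omega)]

theorem pvPushUp (grid : List (List Int)) (k : Int) (hk : 0 ≤ k) (m n i j c0 c2 : Nat)
    (dp dpc : List (List (Array Int)))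
    (him : i < m) (hjn : j < n) (h2 : i + 1 < m)
    (hlen : ∀ u v, u < m → v < n → (pvColAtL dp u v).length = pvKK k)
    (hge : ∀ u v, u < m → v < n → ∀ x ∈ pvColAtL dp u v, pvNEG ≤ x)
    (hall : ∀ u v, u < m → v < n → pvColAtL dpc u v = pvMidSt grid k i j dp c0 c2 u v)
    (hcur : pvGet3 dpc i j c0 ≠ pvNEG) :
    ∀ u v, u < m → v < n →
      pvColAtL (if (c0 : Int) + (pvSC (pvCell grid (i + 1) j)).2 ≤ k then
          pvSet3 dpc (i + 1) j ((c0 : Int) + (pvSC (pvCell grid (i + 1) j)).2).toNat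
            (max (pvGet3 dpc (i + 1) j ((c0 : Int) + (pvSC (pvCell grid (i + 1) j)).2).toNat)
              (pvGet3 dpc i j c0 + (pvSC (pvCell grid (i + 1) j)).1))
        else dpc) u v = pvMidSt grid k i j dp (c0 + 1) c2 u v := by
  have hsrc : pvGet3 dpc i j c0 = (pvColAtL dp i j).getD c0 pvNEG := by
    rw [pvGet3_eq_colAt, hall i j him hjn, pvMidSt_src]
  have hcur' : (pvColAtL dp i j).getD c0 pvNEG ≠ pvNEG := by rw [← hsrc]; exact hcur
  intro u v hu hv
  split_ifs with h3
  · rw [pvColAtL_set3]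
    by_cases ht : i + 1 = u ∧ j = v
    · rw [← ht.1, ← ht.2]
      rw [if_pos ⟨rfl, rfl⟩]
      have hT : pvColAtL dpc (i + 1) j =
          List.zipWith max (pvColAtL dp (i + 1) j)
            (pvShiftP (pvColAtL dp i j) (pvS grid (i + 1) j) (pvC grid (i + 1) j) (pvKK k) c0) := by
        rw [hall (i + 1) j h2 hjn]; unfold pvMidSt; rw [if_pos ⟨rfl, rfl⟩]
      unfold pvMidSt
      rw [if_pos ⟨rfl, rfl⟩]
      rw [pvGet3_eq_colAt, hT, hsrc]
      exact pvPush k hk (pvColAtL dp (i + 1) j) (pvColAtL dp i j) (pvS grid (i + 1) j)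
        (pvC grid (i + 1) j) (pvSC_snd_nonneg _) (hlen (i + 1) j h2 hjn)
        (hge (i + 1) j h2 hjn) c0 hcur' h3
    · rw [if_neg ht, hall u v hu hv]
      have hne1 : ¬(u = i + 1 ∧ v = j) := fun hh => ht ⟨hh.1.symm, hh.2.symm⟩
      unfold pvMidSt
      rw [if_neg hne1, if_neg hne1]
  · rw [hall u v hu hv]
    unfold pvMidSt
    by_cases ht : u = i + 1 ∧ v = j
    · rw [ht.1, ht.2]
      rw [if_pos ⟨rfl, rfl⟩, if_pos ⟨rfl, rfl⟩]
      have hover : k < (c0 : Int) + pvC grid (i + 1) j := by unfold pvC; omega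
      rw [pvShiftP_succ_of_over k hk (pvColAtL dp i j) (pvS grid (i + 1) j)
        (pvC grid (i + 1) j) (pvSC_snd_nonneg _) c0 hover]
    · rw [if_neg ht, if_neg ht]

theorem pvPushLeft (grid : List (List Int)) (k : Int) (hk : 0 ≤ k) (m n i j c1 c0 : Nat)
    (dp dpc : List (List (Array Int)))
    (him : i < m) (hjn : j < n) (h4 : j + 1 < n)
    (hlen : ∀ u v, u < m → v < n → (pvColAtL dp u v).length = pvKK k)
    (hge : ∀ u v, u < m → v < n → ∀ x ∈ pvColAtL dp u v, pvNEG ≤ x)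
    (hall : ∀ u v, u < m → v < n → pvColAtL dpc u v = pvMidSt grid k i j dp c1 c0 u v)
    (hcur : pvGet3 dpc i j c0 ≠ pvNEG) :
    ∀ u v, u < m → v < n →
      pvColAtL (if (c0 : Int) + (pvSC (pvCell grid i (j + 1))).2 ≤ k then
          pvSet3 dpc i (j + 1) ((c0 : Int) + (pvSC (pvCell grid i (j + 1))).2).toNat
            (max (pvGet3 dpc i (j + 1) ((c0 : Int) + (pvSC (pvCell grid i (j + 1))).2).toNat)
              (pvGet3 dpc i j c0 + (pvSC (pvCell grid i (j + 1))).1))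
        else dpc) u v = pvMidSt grid k i j dp c1 (c0 + 1) u v := by
  have hsrc : pvGet3 dpc i j c0 = (pvColAtL dp i j).getD c0 pvNEG := by
    rw [pvGet3_eq_colAt, hall i j him hjn, pvMidSt_src]
  have hcur' : (pvColAtL dp i j).getD c0 pvNEG ≠ pvNEG := by rw [← hsrc]; exact hcur
  intro u v hu hv
  split_ifs with h3
  · rw [pvColAtL_set3]
    by_cases ht : i = u ∧ j + 1 = v
    · rw [← ht.1, ← ht.2]
      rw [if_pos ⟨rfl, rfl⟩]
      have hT : pvColAtL dpc i (j + 1) =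
          List.zipWith max (pvColAtL dp i (j + 1))
            (pvShiftP (pvColAtL dp i j) (pvS grid i (j + 1)) (pvC grid i (j + 1)) (pvKK k) c0) := by
        rw [hall i (j + 1) him h4]; unfold pvMidSt; rw [if_neg (by omega), if_pos ⟨rfl, rfl⟩]
      unfold pvMidSt
      rw [if_neg (by omega), if_pos ⟨rfl, rfl⟩]
      rw [pvGet3_eq_colAt, hT, hsrc]
      exact pvPush k hk (pvColAtL dp i (j + 1)) (pvColAtL dp i j) (pvS grid i (j + 1))
        (pvC grid i (j + 1)) (pvSC_snd_nonneg _) (hlen i (j + 1) him h4)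
        (hge i (j + 1) him h4) c0 hcur' h3
    · rw [if_neg ht, hall u v hu hv]
      have hne1 : ¬(u = i ∧ v = j + 1) := fun hh => ht ⟨hh.1.symm, hh.2.symm⟩
      unfold pvMidSt
      rw [if_neg hne1, if_neg hne1]
  · rw [hall u v hu hv]
    unfold pvMidSt
    by_cases ht : u = i ∧ v = j + 1
    · rw [ht.1, ht.2]
      rw [if_neg (show ¬(i = i + 1 ∧ j + 1 = j) by omega),
        if_neg (show ¬(i = i + 1 ∧ j + 1 = j) by omega),
        if_pos (show i = i ∧ j + 1 = j + 1 from ⟨rfl, rfl⟩),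
        if_pos (show i = i ∧ j + 1 = j + 1 from ⟨rfl, rfl⟩)]
      have hover : k < (c0 : Int) + pvC grid i (j + 1) := by unfold pvC; omega
      rw [pvShiftP_succ_of_over k hk (pvColAtL dp i j) (pvS grid i (j + 1))
        (pvC grid i (j + 1)) (pvSC_snd_nonneg _) c0 hover]
    · by_cases ht1 : u = i + 1 ∧ v = j
      · rw [if_pos ht1, if_pos ht1]
      · rw [if_neg ht1, if_neg ht1, if_neg ht, if_neg ht]

theorem pvCostStep_effect (grid : List (List Int)) (k : Int) (hk : 0 ≤ k) (m n i j c0 : Nat)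
    (dp dpc : List (List (Array Int)))
    (him : i < m) (hjn : j < n)
    (hlen : ∀ u v, u < m → v < n → (pvColAtL dp u v).length = pvKK k)
    (hge : ∀ u v, u < m → v < n → ∀ x ∈ pvColAtL dp u v, pvNEG ≤ x)
    (hall : ∀ u v, u < m → v < n → pvColAtL dpc u v = pvMidSt grid k i j dp c0 c0 u v) :
    ∀ u v, u < m → v < n →
      pvColAtL (pvCostStep grid k m n i j dpc c0) u v =
        pvMidSt grid k i j dp (c0 + 1) (c0 + 1) u v := by
  have hsrc : pvGet3 dpc i j c0 = (pvColAtL dp i j).getD c0 pvNEG := by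
    rw [pvGet3_eq_colAt, hall i j him hjn, pvMidSt_src]
  intro u v hu hv
  unfold pvCostStep
  by_cases hneg : pvGet3 dpc i j c0 = pvNEG
  · rw [if_pos hneg, hall u v hu hv]
    have hn : (pvColAtL dp i j).getD c0 pvNEG = pvNEG := by rw [← hsrc]; exact hneg
    unfold pvMidSt
    split_ifs with ht1 ht2
    · rw [pvShiftP_succ_of_neg _ _ _ _ _ hn]
    · rw [pvShiftP_succ_of_neg _ _ _ _ _ hn]
    · rfl
  · rw [if_neg hneg]
    simp only []
    by_cases h2 : i + 1 < m
    · simp only [if_pos h2]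
      have hmid := pvPushUp grid k hk m n i j c0 c0 dp dpc him hjn h2 hlen hge hall hneg
      have hcur1 : pvGet3 (if (c0 : Int) + (pvSC (pvCell grid (i + 1) j)).2 ≤ k then
          pvSet3 dpc (i + 1) j ((c0 : Int) + (pvSC (pvCell grid (i + 1) j)).2).toNat
            (max (pvGet3 dpc (i + 1) j ((c0 : Int) + (pvSC (pvCell grid (i + 1) j)).2).toNat)
              (pvGet3 dpc i j c0 + (pvSC (pvCell grid (i + 1) j)).1))
        else dpc) i j c0 ≠ pvNEG := by
        rw [pvGet3_eq_colAt, hmid i j him hjn, pvMidSt_src]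
        rw [← hsrc] at *
        exact hneg
      by_cases h4 : j + 1 < n
      · simp only [if_pos h4]
        exact pvPushLeft grid k hk m n i j (c0 + 1) c0 dp _ him hjn h4 hlen hge hmid hcur1 u v hu hv
      · simp only [if_neg h4]
        rw [hmid u v hu hv]
        unfold pvMidSt
        split_ifs with t1 t2
        · rfl
        · exact absurd (by omega : j + 1 < n) h4
        · rfl
    · simp only [if_neg h2]
      have hmid : ∀ u v, u < m → v < n →
          pvColAtL dpc u v = pvMidSt grid k i j dp (c0 + 1) c0 u v := by
        intro u' v' hu' hv'
        rw [hall u' v' hu' hv']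
        unfold pvMidSt
        split_ifs with t1 t2
        · exact absurd (by omega : i + 1 < m) h2
        · rfl
        · rfl
      by_cases h4 : j + 1 < n
      · simp only [if_pos h4]
        exact pvPushLeft grid k hk m n i j (c0 + 1) c0 dp dpc him hjn h4 hlen hge hmid hneg u v hu hv
      · simp only [if_neg h4]
        rw [hmid u v hu hv]
        unfold pvMidSt
        split_ifs with t1 t2
        · rfl
        · exact absurd (by omega : j + 1 < n) h4
        · rfl

-- ---- how pvColSt changes when the loop advances past cell (i,j) ----

theorem pvColSt_congr (grid : List (List Int)) (k : Int) (i j i' j' u v : Nat)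
    (h1 : (0 < u ∧ pvProc i j (u - 1) v) ↔ (0 < u ∧ pvProc i' j' (u - 1) v))
    (h2 : (0 < v ∧ pvProc i j u (v - 1)) ↔ (0 < v ∧ pvProc i' j' u (v - 1))) :
    pvColSt grid k i j u v = pvColSt grid k i' j' u v := by
  unfold pvColSt
  rw [if_congr h1 rfl rfl, if_congr h2 rfl rfl]

theorem pvZW_mem (b u : List Int) (hb : ∀ x ∈ b, pvNEG ≤ x) :
    ∀ x ∈ List.zipWith max b u, pvNEG ≤ x := by
  intro x hx
  rcases List.mem_iff_getElem.mp hx with ⟨a, ha, rfl⟩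
  rw [List.getElem_zipWith]
  exact le_trans (hb _ (List.getElem_mem _)) (le_max_left _ _)

theorem pvColSt_stepUp (grid : List (List Int)) (k : Int) (i j : Nat) :
    pvColSt grid k i (j + 1) (i + 1) j =
      List.zipWith max (pvColSt grid k i j (i + 1) j)
        (pvShiftIdx (pvF grid k i j) (pvS grid (i + 1) j) (pvC grid (i + 1) j) (pvKK k)) := by
  unfold pvColSt
  rw [if_pos (show 0 < i + 1 ∧ pvProc i (j + 1) (i + 1 - 1) j from
      ⟨Nat.succ_pos i, by simp only [Nat.add_sub_cancel]; exact Or.inr ⟨rfl, Nat.lt_succ_self j⟩⟩)]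
  rw [if_neg (show ¬(0 < j ∧ pvProc i (j + 1) (i + 1) (j - 1)) by unfold pvProc; omega)]
  rw [if_neg (show ¬(0 < i + 1 ∧ pvProc i j (i + 1 - 1) j) by unfold pvProc; omega)]
  rw [if_neg (show ¬(0 < j ∧ pvProc i j (i + 1) (j - 1)) by unfold pvProc; omega)]
  simp only [Nat.add_sub_cancel]
  apply List.ext_getElem
  · simp [List.length_zipWith, length_pvBase, length_pvShiftIdx, pvNegCol]
  · intro a h1 h2
    simp only [List.getElem_zipWith]
    have hb : pvNEG ≤ (pvBase grid k (i + 1) j)[a]'(by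
        simp only [List.length_zipWith, length_pvBase, length_pvShiftIdx, pvNegCol,
          List.length_replicate] at h1 ⊢
        omega) := pvGoodGe (pvBase_mem grid k (i + 1) j _ (List.getElem_mem _))
    have hn : (pvNegCol k)[a]'(by
        simp only [List.length_zipWith, length_pvBase, length_pvShiftIdx, pvNegCol,
          List.length_replicate] at h1 ⊢
        omega) = pvNEG := by simp [pvNegCol]
    rw [hn, max_eq_left hb, max_eq_left (le_trans hb (le_max_left _ _)), max_eq_left hb]

theorem pvColSt_stepLeft (grid : List (List Int)) (k : Int) (i j : Nat) :
    pvColSt grid k i (j + 1) i (j + 1) =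
      List.zipWith max (pvColSt grid k i j i (j + 1))
        (pvShiftIdx (pvF grid k i j) (pvS grid i (j + 1)) (pvC grid i (j + 1)) (pvKK k)) := by
  unfold pvColSt
  rw [if_congr (show (0 < i ∧ pvProc i (j + 1) (i - 1) (j + 1)) ↔ 0 < i by unfold pvProc; omega)
    rfl rfl]
  rw [if_congr (show (0 < i ∧ pvProc i j (i - 1) (j + 1)) ↔ 0 < i by unfold pvProc; omega) rfl rfl]
  rw [if_pos (show 0 < j + 1 ∧ pvProc i (j + 1) i (j + 1 - 1) from
      ⟨Nat.succ_pos j, by simp only [Nat.add_sub_cancel]; exact Or.inr ⟨rfl, Nat.lt_succ_self j⟩⟩)]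
  rw [if_neg (show ¬(0 < j + 1 ∧ pvProc i j i (j + 1 - 1)) by unfold pvProc; omega)]
  simp only [Nat.add_sub_cancel]
  rw [pvAbsorbR k _ (by
      simp only [List.length_zipWith, length_pvBase]
      rw [length_pvArm grid k (0 < i) (i - 1) (j + 1) i (j + 1)]
      omega)
    (pvZW_mem _ _ (fun x hx => pvGoodGe (pvBase_mem grid k i (j + 1) x hx)))]

-- ---- A-side: the push loop maintains pvInv ----

theorem pvColSt_zero (grid : List (List Int)) (k : Int) (u v : Nat) :
    pvColSt grid k 0 0 u v = pvBase grid k u v := by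
  unfold pvColSt
  rw [if_neg (show ¬(0 < u ∧ pvProc 0 0 (u - 1) v) by unfold pvProc; omega),
    if_neg (show ¬(0 < v ∧ pvProc 0 0 u (v - 1)) by unfold pvProc; omega)]
  rw [pvAbsorbR k _ (length_pvBase grid k u v) (fun x hx => pvGoodGe (pvBase_mem grid k u v x hx)),
    pvAbsorbR k _ (length_pvBase grid k u v) (fun x hx => pvGoodGe (pvBase_mem grid k u v x hx))]

theorem pvInv_init (grid : List (List Int)) (k : Int) (hk : 0 ≤ k) :
    pvInv grid k
      (if (pvSC (pvCell grid 0 0)).2 ≤ k then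
        pvSet3 (List.replicate grid.length (List.replicate (grid.getD 0 []).length
          (Array.replicate (k + 1).toNat pvNEG))) 0 0 (pvSC (pvCell grid 0 0)).2.toNat
          (pvSC (pvCell grid 0 0)).1
       else List.replicate grid.length (List.replicate (grid.getD 0 []).length
          (Array.replicate (k + 1).toNat pvNEG))) 0 0 := by
  have hc0 : (0 : Int) ≤ (pvSC (pvCell grid 0 0)).2 := pvSC_snd_nonneg _
  have hcol0 : ∀ u v, u < grid.length → v < (grid.getD 0 []).length →
      pvColAtL (List.replicate grid.length (List.replicate (grid.getD 0 []).length
        (Array.replicate (k + 1).toNat pvNEG))) u v = List.replicate (k + 1).toNat pvNEG := by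
    intro u v hu hv
    unfold pvColAtL pvColAt
    rw [List.getD_replicate _ hu, List.getD_replicate _ hv, Array.toList_replicate]
  split_ifs with hc
  · refine ⟨by simp [pvLen_set3], ?_⟩
    intro u hu
    refine ⟨?_, ?_⟩
    · rw [pvRowLen_set3, List.getD_replicate _ hu]
      simp
    · intro v hv
      rw [pvColSt_zero, pvColAtL_set3, hcol0 u v hu hv]
      by_cases huv : 0 = u ∧ 0 = v
      · rw [if_pos huv]
        obtain ⟨h1, h2⟩ := huv
        rw [← h1, ← h2]
        unfold pvBase
        rw [if_pos ⟨rfl, rfl⟩]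
        apply List.ext_getElem
        · simp [pvKK]
        · intro a ha1 ha2
          rw [List.getElem_set]
          simp only [List.getElem_map, List.getElem_range, List.getElem_replicate]
          have hak : a < (k + 1).toNat := by simpa using ha1
          by_cases he : (pvSC (pvCell grid 0 0)).2.toNat = a
          · rw [if_pos he, if_pos (by unfold pvC; omega)]
            rfl
          · rw [if_neg he, if_neg (by unfold pvC; omega)]
      · rw [if_neg huv, pvBase_neg grid k u v (fun hh => huv ⟨hh.1.symm, hh.2.symm⟩)]
        rfl
  · refine ⟨by simp, ?_⟩
    intro u hu
    refine ⟨?_, ?_⟩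
    · rw [List.getD_replicate _ hu]; simp
    · intro v hv
      rw [pvColSt_zero, hcol0 u v hu hv]
      by_cases huv : u = 0 ∧ v = 0
      · obtain ⟨rfl, rfl⟩ := huv
        unfold pvBase
        rw [if_pos ⟨rfl, rfl⟩]
        apply List.ext_getElem
        · simp [pvKK]
        · intro a ha1 ha2
          simp only [List.getElem_map, List.getElem_range, List.getElem_replicate]
          have hak : a < (k + 1).toNat := by simpa using ha1
          rw [if_neg (by unfold pvC; omega)]
      · rw [pvBase_neg grid k u v huv]
        rfl

theorem pvLen_costStep (grid : List (List Int)) (k : Int) (m n i j : Nat)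
    (dpc : List (List (Array Int))) (c0 : Nat) :
    (pvCostStep grid k m n i j dpc c0).length = dpc.length := by
  unfold pvCostStep
  simp only []
  split_ifs <;> simp only [pvLen_set3]

theorem pvRowLen_costStep (grid : List (List Int)) (k : Int) (m n i j : Nat)
    (dpc : List (List (Array Int))) (c0 u : Nat) :
    ((pvCostStep grid k m n i j dpc c0).getD u []).length = (dpc.getD u []).length := by
  unfold pvCostStep
  simp only []
  split_ifs <;> simp only [pvRowLen_set3]

theorem pvLen_costFold (grid : List (List Int)) (k : Int) (m n i j : Nat) :
    ∀ (l : List Nat) (dpc : List (List (Array Int))),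
      (l.foldl (pvCostStep grid k m n i j) dpc).length = dpc.length := by
  intro l
  induction l with
  | nil => intro dpc; rfl
  | cons a t iht =>
    intro dpc
    rw [List.foldl_cons, iht, pvLen_costStep]

theorem pvRowLen_costFold (grid : List (List Int)) (k : Int) (m n i j : Nat) :
    ∀ (l : List Nat) (dpc : List (List (Array Int))) (u : Nat),
      ((l.foldl (pvCostStep grid k m n i j) dpc).getD u []).length = (dpc.getD u []).length := by
  intro l
  induction l with
  | nil => intro dpc u; rfl
  | cons a t iht =>
    intro dpc u
    rw [List.foldl_cons, iht, pvRowLen_costStep]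

theorem pvCostFold_mid (grid : List (List Int)) (k : Int) (hk : 0 ≤ k) (m n i j : Nat)
    (dp : List (List (Array Int))) (him : i < m) (hjn : j < n)
    (hlen : ∀ u v, u < m → v < n → (pvColAtL dp u v).length = pvKK k)
    (hge : ∀ u v, u < m → v < n → ∀ x ∈ pvColAtL dp u v, pvNEG ≤ x) :
    ∀ c0, ∀ u v, u < m → v < n →
      pvColAtL ((List.range c0).foldl (pvCostStep grid k m n i j) dp) u v =
        pvMidSt grid k i j dp c0 c0 u v := by
  intro c0
  induction c0 with
  | zero =>
    intro u v hu hv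
    simp only [List.range_zero, List.foldl_nil]
    unfold pvMidSt
    split_ifs with t1 t2
    · rw [pvShiftP_zero]
      exact (pvAbsorbR k _ (hlen u v hu hv) (hge u v hu hv)).symm
    · rw [pvShiftP_zero]
      exact (pvAbsorbR k _ (hlen u v hu hv) (hge u v hu hv)).symm
    · rfl
  | succ c0 ih =>
    rw [List.range_succ, List.foldl_append, List.foldl_cons, List.foldl_nil]
    exact pvCostStep_effect grid k hk m n i j c0 dp _ him hjn hlen hge ih

theorem pvCellStep_inv (grid : List (List Int)) (k : Int) (hk : 0 ≤ k)
    (dp : List (List (Array Int))) (i j : Nat)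
    (hi : i < grid.length) (hj : j < (grid.getD 0 []).length)
    (h : pvInv grid k dp i j) :
    pvInv grid k (pvCellStep grid k grid.length (grid.getD 0 []).length dp i j) i (j + 1) := by
  obtain ⟨hdlen, hrows⟩ := h
  have hlenc : ∀ u v, u < grid.length → v < (grid.getD 0 []).length →
      (pvColAtL dp u v).length = pvKK k := by
    intro u v hu hv
    rw [(hrows u hu).2 v hv]
    exact length_pvColSt grid k i j u v
  have hgec : ∀ u v, u < grid.length → v < (grid.getD 0 []).length →
      ∀ x ∈ pvColAtL dp u v, pvNEG ≤ x := by
    intro u v hu hv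
    rw [(hrows u hu).2 v hv]
    exact pvColSt_mem grid k i j u v
  have hsrccol : pvColAtL dp i j = pvF grid k i j := by
    rw [(hrows i hi).2 j hj]
    exact pvColSt_full grid k i j i j (fun h0 => Or.inl (by omega))
      (fun h0 => Or.inr ⟨rfl, by omega⟩)
  have hfold := pvCostFold_mid grid k hk grid.length (grid.getD 0 []).length i j dp hi hj
    hlenc hgec (pvKK k)
  have hcell : pvCellStep grid k grid.length (grid.getD 0 []).length dp i j =
      (List.range (pvKK k)).foldl (pvCostStep grid k grid.length (grid.getD 0 []).length i j) dp :=
    rfl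
  refine ⟨?_, ?_⟩
  · rw [hcell, pvLen_costFold]
    exact hdlen
  · intro u hu
    refine ⟨?_, ?_⟩
    · rw [hcell, pvRowLen_costFold]
      exact (hrows u hu).1
    · intro v hv
      rw [hcell, hfold u v hu hv]
      unfold pvMidSt
      split_ifs with t1 t2
      · rw [pvShiftP_top _ _ _ _ _ le_rfl, hsrccol, (hrows u hu).2 v hv, t1.1, t1.2]
        exact (pvColSt_stepUp grid k i j).symm
      · rw [pvShiftP_top _ _ _ _ _ le_rfl, hsrccol, (hrows u hu).2 v hv, t2.1, t2.2]
        exact (pvColSt_stepLeft grid k i j).symm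
      · rw [(hrows u hu).2 v hv]
        exact pvColSt_congr grid k i j i (j + 1) u v
          (by unfold pvProc; omega) (by unfold pvProc; omega)

theorem pvInv_row_end (grid : List (List Int)) (k : Int) (dp : List (List (Array Int))) (i : Nat)
    (h : pvInv grid k dp i (grid.getD 0 []).length) : pvInv grid k dp (i + 1) 0 := by
  obtain ⟨hdlen, hrows⟩ := h
  refine ⟨hdlen, fun u hu => ⟨(hrows u hu).1, fun v hv => ?_⟩⟩
  rw [(hrows u hu).2 v hv]
  exact pvColSt_congr grid k i (grid.getD 0 []).length (i + 1) 0 u v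
    (by unfold pvProc; omega) (by unfold pvProc; omega)

theorem pvRow_inv (grid : List (List Int)) (k : Int) (hk : 0 ≤ k) (i : Nat)
    (hi : i < grid.length) :
    ∀ j0, j0 ≤ (grid.getD 0 []).length → ∀ dp, pvInv grid k dp i 0 →
      pvInv grid k ((List.range j0).foldl
        (fun dp j => pvCellStep grid k grid.length (grid.getD 0 []).length dp i j) dp) i j0 := by
  intro j0
  induction j0 with
  | zero => intro _ dp h; exact h
  | succ j0 ih =>
    intro hj dp h
    rw [List.range_succ, List.foldl_append, List.foldl_cons, List.foldl_nil]
    exact pvCellStep_inv grid k hk _ i j0 hi (by omega) (ih (by omega) dp h)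

theorem pvInv_final (grid : List (List Int)) (k : Int) (hk : 0 ≤ k)
    (dp : List (List (Array Int))) (h : pvInv grid k dp 0 0) :
    pvInv grid k
      ((List.range grid.length).foldl
        (fun dp i => (List.range (grid.getD 0 []).length).foldl
          (fun dp j => pvCellStep grid k grid.length (grid.getD 0 []).length dp i j) dp) dp)
      grid.length 0 := by
  suffices haux : ∀ i0, i0 ≤ grid.length →
      pvInv grid k
        ((List.range i0).foldl
          (fun dp i => (List.range (grid.getD 0 []).length).foldl
            (fun dp j => pvCellStep grid k grid.length (grid.getD 0 []).length dp i j) dp) dp)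
        i0 0 from haux grid.length le_rfl
  intro i0
  induction i0 with
  | zero => intro _; exact h
  | succ i0 ih =>
    intro hi
    rw [List.range_succ, List.foldl_append, List.foldl_cons, List.foldl_nil]
    exact pvInv_row_end grid k _ i0
      (pvRow_inv grid k hk i0 (by omega) (grid.getD 0 []).length le_rfl _ (ih (by omega)))

-- ===== VERDICT (by name: the statement is the Claim_ definition above) =====
theorem maxPathScore_spec : Claim_equal_maxPathScore := by
  intro grid k _hdom hpre
  obtain ⟨hg, hr0, hk, _hrows⟩ := hpre
  have hm : 0 < grid.length := List.length_pos_iff.mpr hg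
  have hn : 0 < (grid.getD 0 []).length := List.length_pos_iff.mpr hr0
  unfold Spec_maxPathScore maxPathScore maxPathScore_alt
  simp only []
  have hfin := pvInv_final grid k hk _ (pvInv_init grid k hk)
  have hA : pvColAtL ((List.range grid.length).foldl
      (fun dp i => (List.range (grid.getD 0 []).length).foldl
        (fun dp j => pvCellStep grid k grid.length (grid.getD 0 []).length dp i j) dp)
      (if (pvSC (pvCell grid 0 0)).2 ≤ k then
        pvSet3 (List.replicate grid.length (List.replicate (grid.getD 0 []).length
          (Array.replicate (k + 1).toNat pvNEG))) 0 0 (pvSC (pvCell grid 0 0)).2.toNat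
          (pvSC (pvCell grid 0 0)).1
       else List.replicate grid.length (List.replicate (grid.getD 0 []).length
          (Array.replicate (k + 1).toNat pvNEG))))
      (grid.length - 1) ((grid.getD 0 []).length - 1) =
      pvF grid k (grid.length - 1) ((grid.getD 0 []).length - 1) := by
    rw [(hfin.2 (grid.length - 1) (by omega)).2 ((grid.getD 0 []).length - 1) (by omega)]
    exact pvColSt_full grid k grid.length 0 (grid.length - 1) ((grid.getD 0 []).length - 1)
      (fun h0 => Or.inl (by omega)) (fun h0 => Or.inl (by omega))
  have hB : (pvColB grid k (grid.length - 1) ((grid.getD 0 []).length - 1) PySem.Dict.empty).1 =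
      pvF grid k (grid.length - 1) ((grid.getD 0 []).length - 1) :=
    (pvColB_eq grid k hk ((grid.length - 1) + ((grid.getD 0 []).length - 1))
      (grid.length - 1) ((grid.getD 0 []).length - 1) le_rfl PySem.Dict.empty
      (fun i j r hr => by simp [PySem.Dict.get?_empty] at hr)).1
  rw [hB, ← hA]
  rfl
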